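-- pv_equiv track=rewrite | github.com/gridvisi/Python_workspace | 3 codewars/6 kyu/6 kyu What will be the odd one out.py | odd_one_out
-- ===== SOURCE A (Python) =====
-- from collections import deque
--
-- def odd_one_out(s):
--     d,re = deque(s),deque('')
--     res = []
--     for e in s:
--         if e not in res:
--             res.append(e)
--         else:res.remove(e)
--     return res
-- ===== SOURCE B (Python) =====
-- from collections import Counter
--
-- def odd_one_out(s):
--     counts = Counter(s)
--     seen = set()
--     buf = []
--     for e in reversed(s):
--         if e not in seen:
--             seen.add(e)
--             if counts[e] % 2 == 1:
--                 buf.append(e)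
--     buf.reverse()
--     return buf
-- ===== Notes on version B (the rewrite author's own statement) =====
-- stated objective: alternative
-- what changed: Replaces A's quadratic append/remove toggle list with a Counter pass plus a single reverse scan guarded by a seen-set, emitting exactly the odd-count characters in order of last occurrence.
import Mathlib
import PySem

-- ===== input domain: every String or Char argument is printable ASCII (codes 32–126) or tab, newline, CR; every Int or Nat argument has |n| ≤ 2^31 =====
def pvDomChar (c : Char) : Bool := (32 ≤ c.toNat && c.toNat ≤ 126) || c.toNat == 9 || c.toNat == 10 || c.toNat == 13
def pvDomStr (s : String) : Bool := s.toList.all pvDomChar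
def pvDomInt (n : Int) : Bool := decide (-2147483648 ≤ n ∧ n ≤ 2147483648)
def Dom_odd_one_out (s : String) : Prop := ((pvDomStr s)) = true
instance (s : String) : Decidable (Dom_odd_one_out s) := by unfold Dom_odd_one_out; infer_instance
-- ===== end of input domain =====

-- B replaces A's append/remove toggle list with a Counter pass plus a seen-set reverse scan (alternative decomposition).

-- ===== PORT A =====
-- 'd, re = deque(s), deque('')' are dead (never read) and are omitted.
-- 'res.remove(e)' is reached only when e ∈ res, where it removes the first
-- occurrence, exactly List.erase.
def odd_one_out (s : String) : List String :=
  (s.toList.map (fun c => String.singleton c)).foldl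
    (fun res e => if !(res.contains e) then res ++ [e] else res.erase e) []

-- ===== PORT B =====
-- counts = Counter(s); then a seen-set scan over reversed(s); buf.reverse() at the end.
def odd_one_out_alt (s : String) : List String :=
  let chars := s.toList.map (fun c => String.singleton c)
  let counts := PySem.Dict.counter chars
  let buf := (chars.reverse.foldl
    (fun (st : PySem.Set String × List String) e =>
      if st.1.contains e then st
      else (PySem.Set.add st.1 e,
            if counts.getD e 0 % 2 == 1 then st.2 ++ [e] else st.2))
    (PySem.Set.empty, [])).2
  buf.reverse

-- ===== PRECONDITION & SPEC =====
def Spec_odd_one_out (s : String) (out : List String) : Prop := out = odd_one_out_alt s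
instance (s : String) (out : List String) : Decidable (Spec_odd_one_out s out) := by unfold Spec_odd_one_out; infer_instance

-- ===== CLAIM (what is proved, stated in full; the proofs are below) =====
def Claim_equal_odd_one_out : Prop := ∀ (s : String), Dom_odd_one_out s → Spec_odd_one_out s (odd_one_out s)

-- ===== LEMMAS AND PROOFS =====

-- last-occurrence dedup: keeps each element's last occurrence, in order
def dlast : List String → List String
  | [] => []
  | e :: t => if e ∈ t then dlast t else e :: dlast t

theorem mem_dlast (l : List String) (x : String) : x ∈ dlast l ↔ x ∈ l := by
  induction l with
  | nil => simp [dlast]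
  | cons e t ih =>
    by_cases h : e ∈ t
    · simp only [dlast, if_pos h, ih, List.mem_cons]
      constructor
      · exact Or.inr
      · rintro (rfl | hx); exact h; exact hx
    · simp [dlast, h, ih]

theorem nodup_dlast (l : List String) : (dlast l).Nodup := by
  induction l with
  | nil => simp [dlast]
  | cons e t ih =>
    by_cases h : e ∈ t <;> simp [dlast, h, ih, mem_dlast]

theorem dlast_append_singleton (t : List String) (c : String) :
    dlast (t ++ [c]) = (dlast t).erase c ++ [c] := by
  induction t with
  | nil => simp [dlast]
  | cons e t ih =>
    by_cases h : e ∈ t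
    · simp [dlast, h, ih]
    · by_cases hc : e = c
      · subst hc
        have : e ∉ dlast t := by simp [mem_dlast, h]
        simp [dlast, h, ih, List.erase_cons_head, List.erase_of_not_mem this]
      · have hmem : e ∉ t ++ [c] := by simp [h, hc]
        have : ((e : String) == c) = false := by simp [hc]
        simp [dlast, h, hmem, ih, List.erase_cons_tail, this]

-- canonical value: odd-count elements, in order of last occurrence
def canonOdd (l : List String) : List String :=
  (dlast l).filter (fun e => l.count e % 2 == 1)

theorem foldA_eq_canon (l : List String) :
    l.foldl (fun res e => if !(res.contains e) then res ++ [e] else res.erase e) []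
      = canonOdd l := by
  induction l using List.reverseRecOn with
  | nil => rfl
  | append_singleton t c ih =>
    rw [List.foldl_append, ih, List.foldl_cons, List.foldl_nil]
    have hnd := nodup_dlast t
    have hcount : ∀ e, (t ++ [c]).count e = t.count e + [c].count e :=
      fun e => List.count_append ..
    by_cases hpar : t.count c % 2 = 1
    · -- odd so far: c is in the toggle list and gets removed; in t++[c] its count is even
      have hmemt : c ∈ t := List.count_pos_iff.mp (by omega)
      have hmem : c ∈ canonOdd t := by
        simp [canonOdd, List.mem_filter, mem_dlast, hmemt, hpar]
      have hcont : (canonOdd t).contains c = true := by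
        simpa [List.contains_iff_mem] using hmem
      rw [if_neg (by simp [hmem])]
      unfold canonOdd
      rw [List.Nodup.erase_eq_filter (List.Nodup.filter _ hnd) c, List.filter_filter,
          dlast_append_singleton, List.filter_append,
          List.Nodup.erase_eq_filter hnd c, List.filter_filter]
      have hc' : ([c].filter (fun e => (t ++ [c]).count e % 2 == 1)) = [] := by
        simp [hcount, hpar, List.count_singleton]
        omega
      rw [hc', List.append_nil]
      apply List.filter_congr
      intro e _
      by_cases he : e = c
      · subst he; simp
      · have : [c].count e = 0 := by
          simp [List.count_eq_zero, he, Ne.symm he]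
        simp [hcount, this, bne_iff_ne, he, Bool.and_comm]
    · -- even so far: c is not in the toggle list and gets appended
      have hmem : c ∉ canonOdd t := by
        simp [canonOdd, List.mem_filter, hpar]
      have hcont : (canonOdd t).contains c = false := by
        simpa [List.contains_iff_mem] using hmem
      rw [if_pos (by simp [hmem])]
      unfold canonOdd
      rw [dlast_append_singleton, List.filter_append,
          List.Nodup.erase_eq_filter hnd c, List.filter_filter]
      have hc' : ([c].filter (fun e => (t ++ [c]).count e % 2 == 1)) = [c] := by
        simp [hcount, List.count_singleton]
        omega
      rw [hc']
      congr 1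
      apply List.filter_congr
      intro e _
      by_cases he : e = c
      · subst he; simp [hpar]
      · have : [c].count e = 0 := by
          simp [List.count_eq_zero, he, Ne.symm he]
        simp [hcount, this, bne_iff_ne, he, Bool.and_comm]

-- B-side first-occurrence scan skeleton
def dF : List String → List String → List String
  | _, [] => []
  | seen, e :: t =>
    if seen.contains e then dF seen t
    else e :: dF (PySem.Set.add seen e) t

theorem foldB_eq (q : String → Bool) (r : List String) :
    ∀ (seen : PySem.Set String) (buf : List String),
    (r.foldl
      (fun (st : PySem.Set String × List String) e =>
        if st.1.contains e then st
        else (PySem.Set.add st.1 e, if q e then st.2 ++ [e] else st.2))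
      (seen, buf)).2 = buf ++ (dF seen r).filter q := by
  induction r with
  | nil => simp [dF]
  | cons e r ih =>
    intro seen buf
    by_cases h : e ∈ seen
    · simp only [List.foldl_cons, dF]
      rw [if_pos (by simp [h]), ih]
      simp [h]
    · simp only [List.foldl_cons, dF]
      rw [if_neg (by simp [h]), ih]
      by_cases hq : q e = true <;> simp [h, hq]

theorem dF_reverse (t : List String) :
    ∀ seen : List String,
    dF seen t.reverse = ((dlast t).filter (fun e => !(seen.contains e))).reverse := by
  induction t using List.reverseRecOn with
  | nil => simp [dF, dlast]
  | append_singleton t c ih =>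
    intro seen
    rw [List.reverse_append, List.reverse_singleton, List.singleton_append,
        dlast_append_singleton, List.filter_append, List.reverse_append,
        List.Nodup.erase_eq_filter (nodup_dlast t) c, List.filter_filter]
    by_cases h : c ∈ seen
    · simp only [dF]
      rw [if_pos (by simp [h]), ih]
      have h1 : ([c].filter (fun e => !(seen.contains e))) = [] := by simp [h]
      rw [h1, List.reverse_nil, List.nil_append]
      congr 1
      apply List.filter_congr
      intro e _
      by_cases he : e = c
      · subst he; simp [h]
      · simp [he, Ne.symm he]
    · simp only [dF]
      rw [if_neg (by simp [h]), ih]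
      have h1 : ([c].filter (fun e => !(seen.contains e))) = [c] := by simp [h]
      rw [h1, List.reverse_singleton, List.singleton_append]
      congr 2
      apply List.filter_congr
      intro e _
      by_cases he : e = c
      · subst he
        simp [PySem.Set.add, h]
      · have hmm : (PySem.Set.add seen c).contains e = seen.contains e := by
          simp [PySem.Set.add, h, he, Ne.symm he]
        simp [hmm, he, Bool.and_comm]

theorem altB_eq_canon (l : List String) : 
    (let counts := PySem.Dict.counter l
     ((l.reverse.foldl
        (fun (st : PySem.Set String × List String) e =>
          if st.1.contains e then st
          else (PySem.Set.add st.1 e,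
                if counts.getD e 0 % 2 == 1 then st.2 ++ [e] else st.2))
        (PySem.Set.empty, [])).2).reverse) = canonOdd l := by
  simp only []
  rw [foldB_eq, List.nil_append, dF_reverse, ← List.filter_reverse, List.reverse_reverse,
      List.filter_filter]
  apply List.filter_congr
  intro e _
  rw [PySem.Dict.getD_counter]
  rcases Nat.mod_two_eq_zero_or_one (l.count e) with h | h <;>
    simp [PySem.Set.empty, h, beq_iff_eq] <;> omega

-- ===== VERDICT (by name: the statement is the Claim_ definition above) =====
theorem odd_one_out_spec : Claim_equal_odd_one_out := by
  intro s _
  unfold Spec_odd_one_out odd_one_out odd_one_out_alt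
  rw [foldA_eq_canon, ← altB_eq_canon]
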